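-- pv_equiv track=rewrite | github.com/hmxmilohax/festivalinfobot | bot/tools/compare_midi.py | compare_tempo_events
-- ===== SOURCE A (Python) =====
-- def compare_tempo_events(tempo_events1, tempo_events2):
--     differences = []
--
--     # Combine both sets of tempo events
--     all_times = sorted(set([t[0] for t in tempo_events1] + [t[0] for t in tempo_events2]))
--
--     # Create dictionaries to map time -> tempo
--     tempo_map1 = {time: tempo for time, tempo in tempo_events1}
--     tempo_map2 = {time: tempo for time, tempo in tempo_events2}
--
--     # Compare tempo changes at each time
--     for time in all_times:
--         tempo1 = tempo_map1.get(time, None)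
--         tempo2 = tempo_map2.get(time, None)
--
--         if tempo1 != tempo2:
--             differences.append((time, tempo1, tempo2))
--
--     return differences
-- ===== SOURCE B (Python) =====
-- def compare_tempo_events(tempo_events1, tempo_events2):
--     # last-wins dedup of duplicate times, like A's dict comprehensions
--     m1 = dict(tempo_events1)
--     m2 = dict(tempo_events2)
--     xs = sorted(m1.items())
--     ys = sorted(m2.items())
--     out = []
--     i = j = 0
--     while i < len(xs) and j < len(ys):
--         t1, v1 = xs[i]
--         t2, v2 = ys[j]
--         if t1 < t2:
--             out.append((t1, v1, None))
--             i += 1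
--         elif t2 < t1:
--             out.append((t2, None, v2))
--             j += 1
--         else:
--             if v1 != v2:
--                 out.append((t1, v1, v2))
--             i += 1
--             j += 1
--     for t, v in xs[i:]:
--         out.append((t, v, None))
--     for t, v in ys[j:]:
--         out.append((t, None, v))
--     return out
-- ===== Notes on version B (the rewrite author's own statement) =====
-- stated objective: alternative
-- what changed: B replaces A's union-set-of-times plus per-time hash lookups with a two-pointer merge of the two sorted (time, tempo) item lists (dicts are still built first so duplicate times collapse last-wins like A).
import Mathlib
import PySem

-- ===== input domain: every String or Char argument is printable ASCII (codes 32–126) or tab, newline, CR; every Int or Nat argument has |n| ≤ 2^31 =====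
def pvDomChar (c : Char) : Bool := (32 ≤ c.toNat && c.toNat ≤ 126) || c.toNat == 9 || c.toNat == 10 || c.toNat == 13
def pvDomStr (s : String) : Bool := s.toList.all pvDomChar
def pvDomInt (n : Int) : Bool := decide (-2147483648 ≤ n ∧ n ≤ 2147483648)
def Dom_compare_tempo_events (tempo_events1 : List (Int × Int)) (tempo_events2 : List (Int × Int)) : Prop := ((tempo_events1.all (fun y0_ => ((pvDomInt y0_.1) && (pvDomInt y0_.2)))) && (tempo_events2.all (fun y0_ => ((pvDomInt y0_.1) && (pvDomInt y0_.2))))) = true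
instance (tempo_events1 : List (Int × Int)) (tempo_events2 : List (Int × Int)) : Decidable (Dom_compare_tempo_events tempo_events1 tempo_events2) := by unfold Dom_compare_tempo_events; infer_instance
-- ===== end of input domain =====

-- B replaces A's union-set-of-times + per-time dict lookups by a two-pointer merge of the two
-- sorted (time, tempo) item lists (same dicts built first, so duplicate times collapse last-wins).

-- ===== PORT A =====
def compare_tempo_events (tempo_events1 : List (Int × Int)) (tempo_events2 : List (Int × Int)) : List (Int × Option Int × Option Int) :=
  let all_times := PySem.List.sorted (PySem.Set.ofList (tempo_events1.map (fun t => t.1) ++ tempo_events2.map (fun t => t.1))) (fun x => x) false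
  let tempo_map1 := tempo_events1.foldl (fun d p => d.insert p.1 p.2) PySem.Dict.empty
  let tempo_map2 := tempo_events2.foldl (fun d p => d.insert p.1 p.2) PySem.Dict.empty
  all_times.foldl (fun acc time =>
    let tempo1 := tempo_map1.get? time
    let tempo2 := tempo_map2.get? time
    if tempo1 ≠ tempo2 then acc ++ [(time, tempo1, tempo2)] else acc) []

-- ===== PORT B =====
-- the while-loop merge of Source B (two pointers = structural recursion on the two lists);
-- the two trailing for-loops over xs[i:] / ys[j:] are the one-sided base cases
def pvMergeDiffs : List (Int × Int) → List (Int × Int) → List (Int × Option Int × Option Int)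
  | [], ys => ys.map (fun p => (p.1, none, some p.2))
  | x :: xs, [] => (x :: xs).map (fun p => (p.1, some p.2, none))
  | (t1, v1) :: xs, (t2, v2) :: ys =>
    if t1 < t2 then (t1, some v1, none) :: pvMergeDiffs xs ((t2, v2) :: ys)
    else if t2 < t1 then (t2, none, some v2) :: pvMergeDiffs ((t1, v1) :: xs) ys
    else if v1 ≠ v2 then (t1, some v1, some v2) :: pvMergeDiffs xs ys
    else pvMergeDiffs xs ys
termination_by xs ys => xs.length + ys.length

def compare_tempo_events_alt (tempo_events1 : List (Int × Int)) (tempo_events2 : List (Int × Int)) : List (Int × Option Int × Option Int) :=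
  let m1 := tempo_events1.foldl (fun d p => d.insert p.1 p.2) PySem.Dict.empty
  let m2 := tempo_events2.foldl (fun d p => d.insert p.1 p.2) PySem.Dict.empty
  -- sorted(m.items()): dict keys are distinct, so Python's tuple sort = sort by the time component
  let xs := PySem.List.sorted m1.items (fun p => p.1) false
  let ys := PySem.List.sorted m2.items (fun p => p.1) false
  pvMergeDiffs xs ys

-- ===== PRECONDITION & SPEC =====
def Spec_compare_tempo_events (tempo_events1 : List (Int × Int)) (tempo_events2 : List (Int × Int)) (out : List (Int × Option Int × Option Int)) : Prop := out = compare_tempo_events_alt tempo_events1 tempo_events2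
instance (tempo_events1 : List (Int × Int)) (tempo_events2 : List (Int × Int)) (out : List (Int × Option Int × Option Int)) : Decidable (Spec_compare_tempo_events tempo_events1 tempo_events2 out) := by unfold Spec_compare_tempo_events; infer_instance

-- ===== CLAIM (what is proved, stated in full; the proofs are below) =====
def Claim_equal_compare_tempo_events : Prop := ∀ (tempo_events1 : List (Int × Int)) (tempo_events2 : List (Int × Int)), Dom_compare_tempo_events tempo_events1 tempo_events2 → Spec_compare_tempo_events tempo_events1 tempo_events2 (compare_tempo_events tempo_events1 tempo_events2)

-- ===== LEMMAS AND PROOFS =====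

-- the merged key sequence of the two sorted item lists
def pvMergeK : List Int → List Int → List Int
  | [], b => b
  | a :: as, [] => a :: as
  | a :: as, b :: bs =>
    if a < b then a :: pvMergeK as (b :: bs)
    else if b < a then b :: pvMergeK (a :: as) bs
    else a :: pvMergeK as bs
termination_by a b => a.length + b.length

theorem mem_pvMergeK (a b : List Int) (t : Int) : t ∈ pvMergeK a b ↔ t ∈ a ∨ t ∈ b := by
  fun_induction pvMergeK a b with
  | case1 => simp
  | case2 => simp
  | case3 a as b bs h ih => simp_all; tauto
  | case4 a as b bs h h' ih => simp_all; tauto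
  | case5 a as b bs h h' ih =>
    have hab : a = b := le_antisymm (le_of_not_gt h') (le_of_not_gt h)
    subst hab; simp_all; tauto

theorem pairwise_pvMergeK (a b : List Int) (ha : a.Pairwise (· < ·)) (hb : b.Pairwise (· < ·)) :
    (pvMergeK a b).Pairwise (· < ·) := by
  fun_induction pvMergeK a b with
  | case1 b => exact hb
  | case2 a as => exact ha
  | case3 a as b bs h ih =>
    rcases ha with _ | ⟨hpa, ha'⟩
    refine List.Pairwise.cons ?_ (ih ha' hb)
    intro y hy
    rcases (mem_pvMergeK _ _ _).mp hy with hy | hy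
    · exact hpa _ hy
    · rcases List.mem_cons.mp hy with rfl | hy
      · exact h
      · rcases hb with _ | ⟨hpb, _⟩
        exact lt_trans h (hpb _ hy)
  | case4 a as b bs h h' ih =>
    rcases hb with _ | ⟨hpb, hb'⟩
    refine List.Pairwise.cons ?_ (ih ha hb')
    intro y hy
    rcases (mem_pvMergeK _ _ _).mp hy with hy | hy
    · rcases List.mem_cons.mp hy with rfl | hy
      · exact h'
      · rcases ha with _ | ⟨hpa, _⟩
        exact lt_trans h' (hpa _ hy)
    · exact hpb _ hy
  | case5 a as b bs h h' ih =>
    have hab : a = b := le_antisymm (le_of_not_gt h') (le_of_not_gt h)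
    rcases ha with _ | ⟨hpa, ha'⟩
    rcases hb with _ | ⟨hpb, hb'⟩
    refine List.Pairwise.cons ?_ (ih ha' hb')
    intro y hy
    rcases (mem_pvMergeK _ _ _).mp hy with hy | hy
    · exact hpa _ hy
    · exact hab ▸ hpb _ hy

theorem lookup_cons_ne (p : Int × Int) (r : List (Int × Int)) (t : Int) (h : t ≠ p.1) :
    List.lookup t (p :: r) = List.lookup t r := by
  have hb : (t == p.1) = false := beq_eq_false_iff_ne.mpr h
  simp [List.lookup, hb]

theorem lookup_eq_none_of_not_mem' (l : List (Int × Int)) (t : Int) (h : t ∉ l.map Prod.fst) :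
    List.lookup t l = none := by
  induction l with
  | nil => rfl
  | cons p r ih =>
    simp only [List.map_cons, List.mem_cons, not_or] at h
    rw [lookup_cons_ne p r t h.1]; exact ih h.2

theorem lookup_eq_some_of_mem (l : List (Int × Int)) (t v : Int)
    (hnd : (l.map Prod.fst).Nodup) (hm : (t, v) ∈ l) : List.lookup t l = some v := by
  induction l with
  | nil => simp at hm
  | cons p r ih =>
    simp only [List.map_cons, List.nodup_cons] at hnd
    rcases List.mem_cons.mp hm with h | h
    · subst h; simp [List.lookup]
    · have hne : t ≠ p.1 := by
        intro he; exact hnd.1 (he ▸ List.mem_map_of_mem (f := Prod.fst) h)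
      rw [lookup_cons_ne p r t hne]; exact ih hnd.2 h

theorem pairwise_lt_of_le_nodup (l : List (Int × Int))
    (hle : l.Pairwise (fun p q => p.1 ≤ q.1)) (hnd : (l.map Prod.fst).Nodup) :
    l.Pairwise (fun p q => p.1 < q.1) := by
  induction l with
  | nil => exact List.Pairwise.nil
  | cons p r ih =>
    simp only [List.map_cons, List.nodup_cons] at hnd
    rcases hle with _ | ⟨hp, hr⟩
    exact List.Pairwise.cons
      (fun q hq => lt_of_le_of_ne (hp q hq)
        (fun he => hnd.1 (he ▸ List.mem_map_of_mem (f := Prod.fst) hq)))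
      (ih hr hnd.2)

theorem left_side (xs : List (Int × Int)) (h : xs.Pairwise (fun p q => p.1 < q.1)) :
    ((xs.map Prod.fst).filter (fun t => decide (List.lookup t xs ≠ none))).map
        (fun t => (t, List.lookup t xs, (none : Option Int))) =
      xs.map (fun p => (p.1, some p.2, none)) := by
  induction xs with
  | nil => rfl
  | cons p r ih =>
    rcases (List.pairwise_cons.mp h) with ⟨hp, hr⟩
    have hne : ∀ t ∈ r.map Prod.fst, t ≠ p.1 := by
      intro t ht
      obtain ⟨q, hq, rfl⟩ := List.mem_map.mp ht
      exact ne_of_gt (hp q hq)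
    have hself : List.lookup p.1 (p :: r) = some p.2 := by simp [List.lookup]
    simp only [List.map_cons, List.filter_cons, hself]
    rw [if_pos (by simp)]
    rw [List.filter_congr (fun t ht => by rw [lookup_cons_ne p r t (hne t ht)])]
    simp only [List.map_cons, hself]
    rw [List.map_congr_left (fun t ht => by
      rw [lookup_cons_ne p r t (hne t (List.mem_of_mem_filter ht))])]
    rw [ih hr]

theorem right_side (ys : List (Int × Int)) (h : ys.Pairwise (fun p q => p.1 < q.1)) :
    ((ys.map Prod.fst).filter (fun t => decide ((none : Option Int) ≠ List.lookup t ys))).map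
        (fun t => (t, (none : Option Int), List.lookup t ys)) =
      ys.map (fun p => (p.1, none, some p.2)) := by
  induction ys with
  | nil => rfl
  | cons p r ih =>
    rcases (List.pairwise_cons.mp h) with ⟨hp, hr⟩
    have hne : ∀ t ∈ r.map Prod.fst, t ≠ p.1 := by
      intro t ht
      obtain ⟨q, hq, rfl⟩ := List.mem_map.mp ht
      exact ne_of_gt (hp q hq)
    have hself : List.lookup p.1 (p :: r) = some p.2 := by simp [List.lookup]
    simp only [List.map_cons, List.filter_cons, hself]
    rw [if_pos (by simp)]
    rw [List.filter_congr (fun t ht => by rw [lookup_cons_ne p r t (hne t ht)])]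
    simp only [List.map_cons, hself]
    rw [List.map_congr_left (fun t ht => by
      rw [lookup_cons_ne p r t (hne t (List.mem_of_mem_filter ht))])]
    rw [ih hr]

theorem pvMergeDiffs_eq (l1 l2 : List (Int × Int))
    (h1 : l1.Pairwise (fun p q => p.1 < q.1)) (h2 : l2.Pairwise (fun p q => p.1 < q.1)) :
    pvMergeDiffs l1 l2 =
      ((pvMergeK (l1.map Prod.fst) (l2.map Prod.fst)).filter
          (fun t => decide (List.lookup t l1 ≠ List.lookup t l2))).map
        (fun t => (t, List.lookup t l1, List.lookup t l2)) := by
  fun_induction pvMergeDiffs l1 l2 with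
  | case1 ys =>
    simp only [List.map_nil, pvMergeK, List.lookup_nil]
    exact (right_side ys h2).symm
  | case2 x xs =>
    have hs := (left_side (x :: xs) h1).symm
    simp only [List.map_cons, List.lookup_nil] at hs ⊢
    rw [show pvMergeK (x.1 :: List.map Prod.fst xs) (List.map Prod.fst ([] : List (Int × Int)))
        = x.1 :: List.map Prod.fst xs from by simp [pvMergeK]]
    exact hs
  | case3 t1 v1 xs t2 v2 ys h ih =>
    rcases List.pairwise_cons.mp h1 with ⟨hp1, h1'⟩
    rcases List.pairwise_cons.mp h2 with ⟨hp2, h2'⟩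
    have hne : ∀ t ∈ pvMergeK (xs.map Prod.fst) (((t2, v2) :: ys).map Prod.fst), t ≠ t1 := by
      intro t ht
      rcases (mem_pvMergeK _ _ _).mp ht with ht | ht
      · obtain ⟨q, hq, rfl⟩ := List.mem_map.mp ht; exact ne_of_gt (hp1 q hq)
      · simp only [List.map_cons, List.mem_cons] at ht
        rcases ht with rfl | ht
        · exact ne_of_gt h
        · obtain ⟨q, hq, rfl⟩ := List.mem_map.mp ht
          exact ne_of_gt (lt_trans h (hp2 q hq))
    have hnone : List.lookup t1 ((t2, v2) :: ys) = none := by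
      apply lookup_eq_none_of_not_mem'
      simp only [List.map_cons, List.mem_cons, not_or]
      refine ⟨ne_of_lt h, fun hm => ?_⟩
      obtain ⟨q, hq, he⟩ := List.mem_map.mp hm
      exact absurd (he ▸ hp2 q hq) (not_lt_of_gt (he ▸ h))
    have hself : List.lookup t1 ((t1, v1) :: xs) = some v1 := by simp [List.lookup]
    have hKeq : pvMergeK (((t1, v1) :: xs).map Prod.fst) (((t2, v2) :: ys).map Prod.fst)
        = t1 :: pvMergeK (xs.map Prod.fst) (((t2, v2) :: ys).map Prod.fst) := by
      simp [pvMergeK, h]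
    rw [hKeq, List.filter_cons]
    rw [if_pos (by simp [hself, hnone])]
    rw [List.filter_congr (fun t ht => by
      rw [lookup_cons_ne ((t1, v1)) xs t (hne t ht)])]
    simp only [List.map_cons, hself, hnone]
    rw [List.map_congr_left (fun t ht => by
      rw [lookup_cons_ne ((t1, v1)) xs t (hne t (List.mem_of_mem_filter ht))])]
    rw [ih h1' h2]
    simp only [List.map_cons]
  | case4 t1 v1 xs t2 v2 ys h h' ih =>
    rcases List.pairwise_cons.mp h1 with ⟨hp1, h1'⟩
    rcases List.pairwise_cons.mp h2 with ⟨hp2, h2'⟩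
    have hne : ∀ t ∈ pvMergeK (((t1, v1) :: xs).map Prod.fst) (ys.map Prod.fst), t ≠ t2 := by
      intro t ht
      rcases (mem_pvMergeK _ _ _).mp ht with ht | ht
      · simp only [List.map_cons, List.mem_cons] at ht
        rcases ht with rfl | ht
        · exact ne_of_gt h'
        · obtain ⟨q, hq, rfl⟩ := List.mem_map.mp ht
          exact ne_of_gt (lt_trans h' (hp1 q hq))
      · obtain ⟨q, hq, rfl⟩ := List.mem_map.mp ht; exact ne_of_gt (hp2 q hq)
    have hnone : List.lookup t2 ((t1, v1) :: xs) = none := by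
      apply lookup_eq_none_of_not_mem'
      simp only [List.map_cons, List.mem_cons, not_or]
      refine ⟨ne_of_lt h', fun hm => ?_⟩
      obtain ⟨q, hq, he⟩ := List.mem_map.mp hm
      exact absurd (he ▸ hp1 q hq) (not_lt_of_gt (he ▸ h'))
    have hself : List.lookup t2 ((t2, v2) :: ys) = some v2 := by simp [List.lookup]
    have hKeq : pvMergeK (((t1, v1) :: xs).map Prod.fst) (((t2, v2) :: ys).map Prod.fst)
        = t2 :: pvMergeK (((t1, v1) :: xs).map Prod.fst) (ys.map Prod.fst) := by
      simp [pvMergeK, h, h']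
    rw [hKeq, List.filter_cons]
    rw [if_pos (by simp [hself, hnone])]
    rw [List.filter_congr (fun t ht => by
      rw [lookup_cons_ne ((t2, v2)) ys t (hne t ht)])]
    simp only [List.map_cons, hself, hnone]
    rw [List.map_congr_left (fun t ht => by
      rw [lookup_cons_ne ((t2, v2)) ys t (hne t (List.mem_of_mem_filter ht))])]
    rw [ih h1 h2']
    simp only [List.map_cons]
  | case5 t1 v1 xs t2 v2 ys h h' hv ih =>
    have hab : t1 = t2 := le_antisymm (le_of_not_gt h') (le_of_not_gt h)
    subst hab
    rcases List.pairwise_cons.mp h1 with ⟨hp1, h1'⟩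
    rcases List.pairwise_cons.mp h2 with ⟨hp2, h2'⟩
    have hne : ∀ t ∈ pvMergeK (xs.map Prod.fst) (ys.map Prod.fst), t ≠ t1 := by
      intro t ht
      rcases (mem_pvMergeK _ _ _).mp ht with ht | ht
      · obtain ⟨q, hq, rfl⟩ := List.mem_map.mp ht; exact ne_of_gt (hp1 q hq)
      · obtain ⟨q, hq, rfl⟩ := List.mem_map.mp ht; exact ne_of_gt (hp2 q hq)
    have hself1 : List.lookup t1 ((t1, v1) :: xs) = some v1 := by simp [List.lookup]
    have hself2 : List.lookup t1 ((t1, v2) :: ys) = some v2 := by simp [List.lookup]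
    have hKeq : pvMergeK (((t1, v1) :: xs).map Prod.fst) (((t1, v2) :: ys).map Prod.fst)
        = t1 :: pvMergeK (xs.map Prod.fst) (ys.map Prod.fst) := by
      simp [pvMergeK]
    rw [hKeq, List.filter_cons]
    rw [if_pos (by simp [hself1, hself2, hv])]
    rw [List.filter_congr (fun t ht => by
      rw [lookup_cons_ne ((t1, v1)) xs t (hne t ht), lookup_cons_ne ((t1, v2)) ys t (hne t ht)])]
    simp only [List.map_cons, hself1, hself2]
    rw [List.map_congr_left (fun t ht => by
      have h' := hne t (List.mem_of_mem_filter ht)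
      rw [lookup_cons_ne ((t1, v1)) xs t h', lookup_cons_ne ((t1, v2)) ys t h'])]
    rw [ih h1' h2']
  | case6 t1 v1 xs t2 v2 ys h h' hv ih =>
    have hab : t1 = t2 := le_antisymm (le_of_not_gt h') (le_of_not_gt h)
    subst hab
    have hveq : v1 = v2 := by by_contra hc; exact hv hc
    subst hveq
    rcases List.pairwise_cons.mp h1 with ⟨hp1, h1'⟩
    rcases List.pairwise_cons.mp h2 with ⟨hp2, h2'⟩
    have hne : ∀ t ∈ pvMergeK (xs.map Prod.fst) (ys.map Prod.fst), t ≠ t1 := by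
      intro t ht
      rcases (mem_pvMergeK _ _ _).mp ht with ht | ht
      · obtain ⟨q, hq, rfl⟩ := List.mem_map.mp ht; exact ne_of_gt (hp1 q hq)
      · obtain ⟨q, hq, rfl⟩ := List.mem_map.mp ht; exact ne_of_gt (hp2 q hq)
    have hself1 : List.lookup t1 ((t1, v1) :: xs) = some v1 := by simp [List.lookup]
    have hself2 : List.lookup t1 ((t1, v1) :: ys) = some v1 := by simp [List.lookup]
    have hKeq : pvMergeK (((t1, v1) :: xs).map Prod.fst) (((t1, v1) :: ys).map Prod.fst)
        = t1 :: pvMergeK (xs.map Prod.fst) (ys.map Prod.fst) := by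
      simp [pvMergeK]
    rw [hKeq, List.filter_cons]
    rw [if_neg (by simp [hself1, hself2])]
    rw [List.filter_congr (fun t ht => by
      rw [lookup_cons_ne ((t1, v1)) xs t (hne t ht), lookup_cons_ne ((t1, v1)) ys t (hne t ht)])]
    rw [List.map_congr_left (fun t ht => by
      have h' := hne t (List.mem_of_mem_filter ht)
      rw [lookup_cons_ne ((t1, v1)) xs t h', lookup_cons_ne ((t1, v1)) ys t h'])]
    rw [ih h1' h2']

theorem dict_side (zs : List (Int × Int)) :
    let m := zs.foldl (fun d p => d.insert p.1 p.2) PySem.Dict.empty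
    let l := PySem.List.sorted m.items (fun p => p.1) false
    l.Pairwise (fun p q => p.1 < q.1) ∧ (∀ t, List.lookup t l = m.get? t) ∧
      (∀ t, t ∈ l.map Prod.fst ↔ t ∈ zs.map Prod.fst) := by
  intro m l
  have hkeys : m.keys = PySem.Set.ofList (zs.map (fun p => p.1)) := by
    have := PySem.Dict.keys_foldl_insert_key zs (fun p => p.1) (fun _ p => p.2) PySem.Dict.empty
    simpa [PySem.Set.update, PySem.Set.ofList] using this
  have hnd : m.keys.Nodup := by
    apply PySem.Dict.nodup_keys_foldl_insert_key
    simp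
  have hperm : l.Perm m.items := PySem.List.sorted_perm _ _ _
  have hpermk : (l.map Prod.fst).Perm m.keys := hperm.map Prod.fst
  have hndl : (l.map Prod.fst).Nodup := (hpermk.nodup_iff).mpr hnd
  have hlt : l.Pairwise (fun p q => p.1 < q.1) :=
    pairwise_lt_of_le_nodup l (PySem.List.sorted_pairwise _ _) hndl
  refine ⟨hlt, fun t => ?_, fun t => ?_⟩
  · cases hg : m.get? t with
    | none =>
      apply lookup_eq_none_of_not_mem'
      intro hm
      exact ((PySem.Dict.get?_eq_none_iff_not_mem_keys _ _).mp hg) (hpermk.mem_iff.mp hm)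
    | some v =>
      exact lookup_eq_some_of_mem l t v hndl
        (hperm.mem_iff.mpr (PySem.Dict.mem_items_of_get?_eq_some _ hg))
  · rw [hpermk.mem_iff, hkeys, PySem.Set.mem_ofList]

theorem compare_eq (tempo_events1 tempo_events2 : List (Int × Int)) :
    compare_tempo_events tempo_events1 tempo_events2 = compare_tempo_events_alt tempo_events1 tempo_events2 := by
  obtain ⟨hlt1, hlk1, hmem1⟩ := dict_side tempo_events1
  obtain ⟨hlt2, hlk2, hmem2⟩ := dict_side tempo_events2
  set m1 := tempo_events1.foldl (fun d p => d.insert p.1 p.2) PySem.Dict.empty with hm1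
  set m2 := tempo_events2.foldl (fun d p => d.insert p.1 p.2) PySem.Dict.empty with hm2
  set l1 := PySem.List.sorted m1.items (fun p => p.1) false with hl1
  set l2 := PySem.List.sorted m2.items (fun p => p.1) false with hl2
  have hU : PySem.List.sorted (PySem.Set.ofList (tempo_events1.map (fun t => t.1) ++ tempo_events2.map (fun t => t.1))) (fun x => x) false
      = pvMergeK (l1.map Prod.fst) (l2.map Prod.fst) := by
    apply PySem.List.sorted_eq_of_perm_of_pairwise_lt
    · apply List.perm_of_nodup_nodup_toFinset_eq
      · exact (pairwise_pvMergeK _ _ ((List.pairwise_map).mpr hlt1) ((List.pairwise_map).mpr hlt2)).imp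
          (fun hab => ne_of_lt hab)
      · exact PySem.Set.nodup_ofList _
      · ext t
        simp only [List.mem_toFinset, mem_pvMergeK, PySem.Set.mem_ofList, List.mem_append,
          hmem1 t, hmem2 t]
    · exact pairwise_pvMergeK _ _ ((List.pairwise_map).mpr hlt1) ((List.pairwise_map).mpr hlt2)
  show (PySem.List.sorted (PySem.Set.ofList (tempo_events1.map (fun t => t.1) ++ tempo_events2.map (fun t => t.1))) (fun x => x) false).foldl
      (fun acc time => if m1.get? time ≠ m2.get? time then acc ++ [(time, m1.get? time, m2.get? time)] else acc) []
      = pvMergeDiffs l1 l2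
  rw [hU, PySem.List.foldl_append_ite (p := fun time => m1.get? time ≠ m2.get? time)
      (f := fun time => (time, m1.get? time, m2.get? time))]
  rw [pvMergeDiffs_eq l1 l2 hlt1 hlt2]
  simp only [hlk1, hlk2, List.nil_append]

-- ===== VERDICT (by name: the statement is the Claim_ definition above) =====
theorem compare_tempo_events_spec : Claim_equal_compare_tempo_events := by
  intro tempo_events1 tempo_events2 _
  unfold Spec_compare_tempo_events
  exact compare_eq tempo_events1 tempo_events2
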